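-- pv_equiv track=rewrite | github.com/Umar-Eh/Cryptoanalysis-of-Vigenere-Cipher | kasiskiMethod.py | getSubstrings
-- ===== SOURCE A (Python) =====
-- def getSubstrings(keyLength, text):
-- 	substrings = []
-- 	subarray = []
--
-- 	if (keyLength > 0):
-- 		for j in range(keyLength):
-- 			subarray.append([])
-- 			for k in range(len(text)):
-- 				if (((k - j) % keyLength) == 0):
-- 					subarray[j].append(text[k])
-- 			substrings.append("".join(subarray[j]))
-- 	return substrings
-- ===== SOURCE B (Python) =====
-- def getSubstrings(keyLength, text):
--     if keyLength <= 0: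
--         return []
--     buckets = {}
--     for k, ch in enumerate(text):
--         buckets.setdefault(k % keyLength, []).append(ch)
--     return ["".join(buckets.get(j, [])) for j in range(keyLength)]
-- ===== Notes on version B (the rewrite author's own statement) =====
-- stated objective: faster
-- what changed: Replace the nested loops (for each of the keyLength buckets, a full scan of text testing (k-j)%keyLength==0) by a single pass over enumerate(text) that appends each character to the dict bucket k%keyLength.
import Mathlib
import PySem

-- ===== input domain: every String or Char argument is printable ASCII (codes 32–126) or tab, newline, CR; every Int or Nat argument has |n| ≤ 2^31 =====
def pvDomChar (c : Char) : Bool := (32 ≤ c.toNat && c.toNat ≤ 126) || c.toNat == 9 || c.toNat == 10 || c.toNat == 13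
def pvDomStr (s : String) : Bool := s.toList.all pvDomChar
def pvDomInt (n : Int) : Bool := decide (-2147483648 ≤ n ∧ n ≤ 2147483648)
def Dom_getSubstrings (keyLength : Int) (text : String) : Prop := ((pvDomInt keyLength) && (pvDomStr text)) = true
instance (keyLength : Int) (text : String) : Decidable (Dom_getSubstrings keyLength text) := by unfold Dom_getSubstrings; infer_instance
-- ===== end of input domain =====

-- B replaces A's keyLength full scans of text by one pass appending text[k] to bucket k % keyLength (proved equal; measured asymptotically faster).

-- ===== PORT A =====
-- literal port of A: for each j in range(keyLength), scan all of text and keep the chars with (k-j)%keyLength==0.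
-- text[k]: k is always in range here, so pyGetD's default is never used.
def getSubstrings (keyLength : Int) (text : String) : List String :=
  if keyLength > 0 then
    (PySem.List.pyRange 0 keyLength 1).foldl (fun substrings j =>
      let bucket := (PySem.List.pyRange 0 (PySem.Str.len text) 1).foldl
        (fun acc k =>
          if PySem.Int.mod (k - j) keyLength == 0 then
            acc ++ [PySem.List.pyGetD text.toList k ' ']
          else acc) ([] : List Char)
      substrings ++ [String.mk bucket]) []
  else []

-- ===== PORT B =====
-- port of Source B: one pass over enumerate(text), grouping chars in a dict keyed by k % keyLength.
def getSubstrings_alt (keyLength : Int) (text : String) : List String :=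
  if keyLength ≤ 0 then []
  else
    let buckets :=
      (PySem.List.enumerate text.toList 0).foldl
        (fun d p => d.modify (PySem.Int.mod p.1 keyLength) [] (fun b => b ++ [p.2]))
        (PySem.Dict.empty : PySem.Dict Int (List Char))
    (PySem.List.pyRange 0 keyLength 1).map (fun j => String.mk (buckets.getD j []))

-- ===== PRECONDITION & SPEC =====
def Spec_getSubstrings (keyLength : Int) (text : String) (out : List String) : Prop := out = getSubstrings_alt keyLength text
instance (keyLength : Int) (text : String) (out : List String) : Decidable (Spec_getSubstrings keyLength text out) := by unfold Spec_getSubstrings; infer_instance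

-- ===== CLAIM (what is proved, stated in full; the proofs are below) =====
def Claim_equal_getSubstrings : Prop := ∀ (keyLength : Int) (text : String), Dom_getSubstrings keyLength text → Spec_getSubstrings keyLength text (getSubstrings keyLength text)

-- ===== LEMMAS AND PROOFS =====
lemma emod_sub_zero_iff (kl j x : Int) (hk : 0 < kl) (hj0 : 0 ≤ j) (hj : j < kl) :
    (x - j) % kl = 0 ↔ x % kl = j := by
  constructor
  · intro h
    obtain ⟨c, hc⟩ : kl ∣ (x - j) := Int.dvd_of_emod_eq_zero h
    have hx : x = j + kl * c := by linarith
    subst hx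
    simp [Int.add_mul_emod_self_left, Int.emod_eq_of_lt hj0 hj]
  · intro h
    have : x - j = kl * (x / kl) := by
      have := Int.emod_def x kl
      omega
    rw [this]
    simp

lemma cond_eq (kl j : Int) (hk : 0 < kl) (hj0 : 0 ≤ j) (hj : j < kl) (x : Int) :
    (PySem.Int.mod (x - j) kl == 0) = (PySem.Int.mod x kl == j) := by
  rw [Bool.eq_iff_iff]
  simp only [beq_iff_eq, PySem.Int.mod_eq_emod_of_pos hk]
  exact emod_sub_zero_iff kl j x hk hj0 hj

lemma innerA_eq (kl j : Int) (l : List Char) :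
    (PySem.List.pyRange 0 (PySem.List.len l) 1).foldl
      (fun acc k => if PySem.Int.mod (k - j) kl == 0 then acc ++ [PySem.List.pyGetD l k ' '] else acc) [] =
    ((PySem.List.enumerate l 0).filter (fun p => PySem.Int.mod (p.1 - j) kl == 0)).map Prod.snd := by
  rw [PySem.List.enumerate_eq_map_pyRange (d := ' '), List.filter_map, List.map_map,
    PySem.List.foldl_append_if]
  simp only [Function.comp_def, List.nil_append]

lemma bucketB_eq (kl j : Int) (l : List Char) :
    ((PySem.List.enumerate l 0).foldl
        (fun d p => d.modify (PySem.Int.mod p.1 kl) [] (fun b => b ++ [p.2]))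
        (PySem.Dict.empty : PySem.Dict Int (List Char))).getD j [] =
    ((PySem.List.enumerate l 0).filter (fun p => PySem.Int.mod p.1 kl == j)).map Prod.snd := by
  have key : ((PySem.List.enumerate l 0).foldl
        (fun d p => d.modify (PySem.Int.mod p.1 kl) [] (fun b => b ++ [p.2]))
        (PySem.Dict.empty : PySem.Dict Int (List Char)))
      = (((PySem.List.enumerate l 0).map (fun p => (PySem.Int.mod p.1 kl, p.2))).foldl
        (fun d q => d.modify q.1 [] (fun b => b ++ [q.2]))
        (PySem.Dict.empty : PySem.Dict Int (List Char))) := by rw [List.foldl_map]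
  rw [key, PySem.Dict.getD_foldl_modify_append, List.filter_map, List.map_map]
  simp only [Function.comp_def]
  simp

-- ===== VERDICT (by name: the statement is the Claim_ definition above) =====
theorem getSubstrings_spec : Claim_equal_getSubstrings := by
  intro kl text _
  unfold Spec_getSubstrings getSubstrings getSubstrings_alt
  by_cases hkl : 0 < kl
  · rw [if_pos hkl, if_neg (by omega : ¬ kl ≤ 0)]
    simp only [PySem.List.foldl_append_singleton_eq_map, List.nil_append]
    apply List.map_congr_left
    intro j hj
    obtain ⟨hj0, hjlt⟩ := (PySem.List.mem_pyRange_one).mp hj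
    have hlen : PySem.Str.len text = PySem.List.len text.toList := by
      simp [PySem.Str.len_eq, PySem.List.len_eq]
    rw [hlen, innerA_eq, bucketB_eq,
      List.filter_congr (fun x _ => cond_eq kl j hkl hj0 hjlt x.1)]
  · rw [if_neg hkl, if_pos (by omega : kl ≤ 0)]
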